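-- pv_equiv track=rewrite | github.com/JakubKramp/advent_of_code | 2022/08/main.py | visible_from_side
-- ===== SOURCE A (Python) =====
-- def visible_from_side(value, list):
--     value = ord(value)
--     while value < 58:
--         if chr(value) in list:
--             return False
--         else:
--             value += 1
--     return True
-- ===== SOURCE B (Python) =====
-- def visible_from_side(value, list):
--     height = ord(value)
--     for tree in list:
--         if len(tree) == 1 and height <= ord(tree) <= 57:
--             return False
--     return True
-- ===== Notes on version B (the rewrite author's own statement) =====
-- stated objective: alternative
-- what changed: A scans the candidate digit space, counting a codepoint up from ord(value) to 58 and rescanning the list with a membership test for each candidate character; B makes one pass over the list itself, returning False at the first single-character element whose codepoint lies in [ord(value), 57].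
import Mathlib
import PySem

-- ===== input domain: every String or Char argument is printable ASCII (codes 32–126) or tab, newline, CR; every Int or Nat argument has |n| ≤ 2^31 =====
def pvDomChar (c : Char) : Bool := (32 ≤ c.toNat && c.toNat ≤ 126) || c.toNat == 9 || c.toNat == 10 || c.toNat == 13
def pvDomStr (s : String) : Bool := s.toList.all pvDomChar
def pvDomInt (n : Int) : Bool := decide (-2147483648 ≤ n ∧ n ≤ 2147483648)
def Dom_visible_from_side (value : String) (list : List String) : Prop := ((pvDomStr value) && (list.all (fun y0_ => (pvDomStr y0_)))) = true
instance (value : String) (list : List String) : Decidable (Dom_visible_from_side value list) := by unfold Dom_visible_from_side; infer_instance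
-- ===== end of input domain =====

-- ===== PORT A =====
-- B scans the list once instead of A's per-candidate-digit rescans of the list.

-- A's while loop: v counts up from ord(value); returns False when chr(v) is in list, True once v reaches 58
def visWhile (list : List String) (v : Nat) : Bool :=
  if v < 58 then
    if String.ofList [Char.ofNat v] ∈ list then false
    else visWhile list (v + 1)
  else true
termination_by 58 - v

-- ord(s): the code point of a one-character string (none = TypeError, excluded by Pre_)
def pyOrd (s : String) : Option Nat :=
  match s.toList with
  | [c] => some c.toNat
  | _ => none

def visible_from_side (value : String) (list : List String) : Bool :=
  match pyOrd value with
  | some v => visWhile list v       -- value = ord(value)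
  | none => true                    -- unreachable under Pre_

-- ===== PORT B =====
-- B's for loop: one pass over the list; False at the first single-character tree with codepoint in [height, 57]
def visAltLoop (height : Nat) : List String → Bool
  | [] => true
  | tree :: rest =>
      match tree.toList with                                -- len(tree) == 1 and height <= ord(tree) <= 57 (ord short-circuited behind the length test)
      | [c] => if height ≤ c.toNat && c.toNat ≤ 57 then false else visAltLoop height rest
      | _ => visAltLoop height rest

def visible_from_side_alt (value : String) (list : List String) : Bool :=
  match pyOrd value with
  | some height => visAltLoop height list                   -- height = ord(value); TypeError unless one character (excluded by Pre_)
  | none => true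

-- ===== PRECONDITION & SPEC =====
-- Pre_ excludes exactly the inputs where A raises: ord(value) needs value to be a single character (TypeError otherwise).
def Pre_visible_from_side (value : String) (list : List String) : Prop :=
  value.toList.length = 1
instance (value : String) (list : List String) : Decidable (Pre_visible_from_side value list) := by unfold Pre_visible_from_side; infer_instance
def pvWitness_visible_from_side : String × List String := ("5", ["3", "17", "9"])

def Spec_visible_from_side (value : String) (list : List String) (out : Bool) : Prop := out = visible_from_side_alt value list
instance (value : String) (list : List String) (out : Bool) : Decidable (Spec_visible_from_side value list out) := by unfold Spec_visible_from_side; infer_instance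

-- ===== CLAIM (what is proved, stated in full; the proofs are below) =====
def Claim_equal_visible_from_side : Prop := ∀ (value : String) (list : List String), Dom_visible_from_side value list → Pre_visible_from_side value list → Spec_visible_from_side value list (visible_from_side value list)

-- ===== LEMMAS AND PROOFS =====

-- A's loop returns True exactly when no digit character from code v up to 57 occurs in the list
theorem visWhile_iff (list : List String) :
    ∀ (n v : Nat), 58 - v ≤ n →
      (visWhile list v = true ↔ ∀ k, v ≤ k → k < 58 → String.ofList [Char.ofNat k] ∉ list) := by
  intro n
  induction n with
  | zero =>
    intro v hv
    rw [visWhile]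
    have h58 : ¬ v < 58 := by omega
    simp only [if_neg h58]
    constructor
    · intro _ k hk1 hk2; omega
    · intro _; trivial
  | succ n ih =>
    intro v hv
    rw [visWhile]
    by_cases h58 : v < 58
    · simp only [if_pos h58]
      by_cases hmem : String.ofList [Char.ofNat v] ∈ list
      · simp only [if_pos hmem]
        constructor
        · intro h; exact absurd h (by simp)
        · intro h; exact absurd hmem (h v le_rfl h58)
      · simp only [if_neg hmem]
        rw [ih (v + 1) (by omega)]
        constructor
        · intro h k hk1 hk2
          rcases Nat.eq_or_lt_of_le hk1 with rfl | hlt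
          · exact hmem
          · exact h k hlt hk2
        · intro h k hk1 hk2; exact h k (by omega) hk2
    · simp only [if_neg h58]
      constructor
      · intro _ k hk1 hk2; omega
      · intro _; trivial

-- B's loop returns True exactly when no element of the list is a blocking single character
theorem visAltLoop_iff (height : Nat) :
    ∀ (list : List String),
      (visAltLoop height list = true ↔
        ∀ t ∈ list, ∀ c, t.toList = [c] → ¬ (height ≤ c.toNat ∧ c.toNat ≤ 57)) := by
  intro list
  induction list with
  | nil => simp [visAltLoop]
  | cons t rest ih =>
    rw [visAltLoop]
    rcases hl : t.toList with _ | ⟨c, _ | ⟨c', cs⟩⟩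
    · simp only [ih]
      constructor
      · intro h s hs
        rcases List.mem_cons.mp hs with rfl | hs'
        · intro d hd; rw [hl] at hd; exact absurd hd (by simp)
        · exact h s hs'
      · intro h s hs; exact h s (List.mem_cons_of_mem _ hs)
    · by_cases hblk : height ≤ c.toNat ∧ c.toNat ≤ 57
      · have hb : (height ≤ c.toNat && c.toNat ≤ 57) = true := by
          simp [hblk.1, hblk.2]
        simp only [hb, if_true]
        constructor
        · intro h; exact absurd h (by simp)
        · intro h
          exact absurd hblk (h t (by simp) c hl)
      · have hb : ¬ ((height ≤ c.toNat && c.toNat ≤ 57) = true) := by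
          simpa using hblk
        simp only [if_neg hb, ih]
        constructor
        · intro h s hs
          rcases List.mem_cons.mp hs with rfl | hs'
          · intro d hd
            rw [hl] at hd
            have hcd : c = d := by simpa using hd
            subst hcd
            exact hblk
          · exact h s hs'
        · intro h s hs; exact h s (List.mem_cons_of_mem _ hs)
    · simp only [ih]
      constructor
      · intro h s hs
        rcases List.mem_cons.mp hs with rfl | hs'
        · intro d hd; rw [hl] at hd; exact absurd hd (by simp)
        · exact h s hs'
      · intro h s hs; exact h s (List.mem_cons_of_mem _ hs)

-- ===== VERDICT (by name: the statement is the Claim_ definition above) =====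
theorem visible_from_side_spec : Claim_equal_visible_from_side := by
  intro value list _ hpre
  unfold Spec_visible_from_side visible_from_side visible_from_side_alt
  obtain ⟨a, ha⟩ : ∃ a, value.toList = [a] := by
    rcases hl : value.toList with _ | ⟨a, _ | _⟩ <;> simp_all [Pre_visible_from_side]
  have hord : pyOrd value = some a.toNat := by rw [pyOrd, ha]
  rw [hord]
  rw [Bool.eq_iff_iff, visWhile_iff list 58 a.toNat (by omega), visAltLoop_iff]
  constructor
  · intro h t ht c hc hblk
    have hco : Char.ofNat c.toNat = c := Char.ofNat_toNat c
    have htval : t = String.ofList [c] := by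
      have := congrArg String.ofList hc; simpa using this
    refine h c.toNat hblk.1 (by omega) ?_
    rw [hco, ← htval]; exact ht
  · intro h k hk1 hk2 hmem
    have hval58 : (Char.ofNat k).toNat = k := by
      rw [Char.toNat_ofNat, if_pos (Or.inl (by omega))]
    have hne := h _ hmem (Char.ofNat k) (by simp)
    rw [hval58] at hne
    exact hne ⟨hk1, by omega⟩
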